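-- pv_equiv track=rewrite | github.com/BigBaz54/advent_of_code_2023 | python/day12/puzzle1/damage_arrangements.py | is_row_valid
-- ===== SOURCE A (Python) =====
-- def is_row_valid(springs, damages):
--     current_damages_blocks = []
--     current_block_damage = 0
--     for s in springs:
--         if s == '#':
--             current_block_damage += 1
--         else:
--             if current_block_damage > 0:
--                 current_damages_blocks.append(current_block_damage)
--             current_block_damage = 0
--     if current_block_damage > 0:
--         current_damages_blocks.append(current_block_damage)
--     return current_damages_blocks == damages
-- ===== SOURCE B (Python) =====
-- def is_row_valid(springs, damages):
--     masked = ''.join(c if c == '#' else ' ' for c in springs)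
--     return [len(run) for run in masked.split()] == damages
-- ===== Notes on version B (the rewrite author's own statement) =====
-- stated objective: simpler
-- what changed: Replaces the character-by-character state machine (running counter, conditional appends, trailing-block epilogue) by masking non-'#' characters to spaces and letting str.split() extract the maximal '#' runs in one call, comparing their lengths to damages.
import Mathlib
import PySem

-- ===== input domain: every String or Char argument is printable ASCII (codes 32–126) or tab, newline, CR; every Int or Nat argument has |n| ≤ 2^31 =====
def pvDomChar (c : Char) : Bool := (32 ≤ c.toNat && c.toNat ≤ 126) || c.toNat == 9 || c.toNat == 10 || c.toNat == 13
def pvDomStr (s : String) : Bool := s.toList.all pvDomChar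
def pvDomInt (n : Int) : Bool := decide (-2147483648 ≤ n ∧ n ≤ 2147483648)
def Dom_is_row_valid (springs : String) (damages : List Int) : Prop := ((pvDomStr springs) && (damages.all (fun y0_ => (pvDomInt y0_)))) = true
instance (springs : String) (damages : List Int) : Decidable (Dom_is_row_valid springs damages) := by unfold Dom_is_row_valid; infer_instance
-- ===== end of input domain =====

-- B replaces A's char-by-char counter state machine by masking non-'#' chars to spaces and
-- splitting on whitespace, comparing the run lengths to damages (simpler decomposition, same cost).


-- ===== PORT A =====
def is_row_valid (springs : String) (damages : List Int) : Bool :=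
  let st := springs.toList.foldl
    (fun (st : List Int × Int) s =>
      if s = '#' then (st.1, st.2 + 1)
      else (if st.2 > 0 then st.1 ++ [st.2] else st.1, 0))
    (([] : List Int), (0 : Int))
  (if st.2 > 0 then st.1 ++ [st.2] else st.1) == damages

-- ===== PORT B =====
def is_row_valid_alt (springs : String) (damages : List Int) : Bool :=
  let masked := String.ofList (springs.toList.map (fun c => if c = '#' then c else ' '))
  ((PySem.Str.split₀ masked).map PySem.Str.len) == damages

-- ===== PRECONDITION & SPEC =====
def Spec_is_row_valid (springs : String) (damages : List Int) (out : Bool) : Prop := out = is_row_valid_alt springs damages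
instance (springs : String) (damages : List Int) (out : Bool) : Decidable (Spec_is_row_valid springs damages out) := by unfold Spec_is_row_valid; infer_instance

-- ===== CLAIM (what is proved, stated in full; the proofs are below) =====
def Claim_equal_is_row_valid : Prop := ∀ (springs : String) (damages : List Int), Dom_is_row_valid springs damages → Spec_is_row_valid springs damages (is_row_valid springs damages)

-- ===== LEMMAS AND PROOFS =====

-- Relates split₀'s worker on the masked list to A's fold, generalizing over the in-progress run
-- (go's `cur`, A's counter) and the blocks emitted so far (go's reversed `acc`, A's list).
theorem go_vs_fold (cs : List Char) : ∀ (cur : List Char) (acc : List (List Char)),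
    (PySem.Chars.split₀.go (cs.map (fun c => if c = '#' then c else ' ')) cur acc).map PySem.Chars.len
    = (let st := cs.foldl
        (fun (st : List Int × Int) s =>
          if s = '#' then (st.1, st.2 + 1)
          else (if st.2 > 0 then st.1 ++ [st.2] else st.1, 0))
        ((acc.reverse.map PySem.Chars.len), (cur.length : Int));
       if st.2 > 0 then st.1 ++ [st.2] else st.1) := by
  induction cs with
  | nil =>
    intro cur acc
    simp only [List.map_nil, PySem.Chars.split₀.go, List.foldl_nil]
    by_cases h : cur = []
    · subst h; simp
    · have h1 : cur.isEmpty = false := by simpa [List.isEmpty_iff] using h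
      have hn : 0 < cur.length := List.length_pos_iff.mpr h
      simp [h1, hn, PySem.Chars.len]
  | cons c rest ih =>
    intro cur acc
    by_cases hc : c = '#'
    · subst hc
      have hns : PySem.Chars.isspace '#' = false := by decide
      simp only [List.map_cons, if_true, List.foldl_cons, PySem.Chars.split₀.go, hns,
        Bool.false_eq_true, if_false]
      have := ih ('#' :: cur) acc
      simp only [List.length_cons] at this
      rw [this]
      norm_num
    · have hspace : PySem.Chars.isspace ' ' = true := by decide
      simp only [List.map_cons, if_neg hc, List.foldl_cons, PySem.Chars.split₀.go, hspace, if_true]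
      by_cases h : cur = []
      · subst h
        simp only [List.isEmpty_nil, if_true, List.length_nil, Nat.cast_zero]
        rw [ih [] acc]
        norm_num
      · have h1 : cur.isEmpty = false := by simpa [List.isEmpty_iff] using h
        have hn : 0 < cur.length := List.length_pos_iff.mpr h
        simp only [h1, Bool.false_eq_true, if_false]
        rw [ih [] (cur.reverse :: acc)]
        simp [hn, PySem.Chars.len]

-- ===== VERDICT (by name: the statement is the Claim_ definition above) =====
theorem is_row_valid_spec : Claim_equal_is_row_valid := by
  intro springs damages _
  unfold Spec_is_row_valid is_row_valid is_row_valid_alt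
  have hmap : (PySem.Str.split₀ (String.ofList (springs.toList.map (fun c => if c = '#' then c else ' ')))).map PySem.Str.len
      = (PySem.Chars.split₀ ((springs.toList.map (fun c => if c = '#' then c else ' ')))).map PySem.Chars.len := by
    simp only [PySem.Str.split₀, String.toList_ofList, List.map_map]
    refine List.map_congr_left (fun x _ => ?_)
    simp [PySem.Str.len, PySem.Chars.len]
  simp only [hmap]
  rw [show PySem.Chars.split₀ (springs.toList.map (fun c => if c = '#' then c else ' '))
        = PySem.Chars.split₀.go (springs.toList.map (fun c => if c = '#' then c else ' ')) [] []
      from rfl]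
  rw [go_vs_fold springs.toList [] []]
  simp
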